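-- pv_equiv track=rewrite | github.com/vitorpy/fsn | analysis/extract_call_signatures.py | merge_arg_types
-- ===== SOURCE A (Python) =====
-- from typing import Dict, List, Tuple, Set
--
-- def merge_arg_types(type_lists: List[List[str]]) -> List[str]:
--     """Merge multiple call signatures into a canonical type list."""
--     if not type_lists:
--         return []
--
--     # Find max argument count
--     max_args = max(len(tl) for tl in type_lists)
--
--     result = []
--     for i in range(max_args):
--         types_at_pos = []
--         for tl in type_lists:
--             if i < len(tl):
--                 types_at_pos.append(tl[i])
--
--         # Pick the most specific type
--         if 'void *' in types_at_pos:
--             result.append('void *')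
--         elif 'const char *' in types_at_pos:
--             result.append('const char *')
--         elif 'Widget' in types_at_pos:
--             result.append('Widget')
--         elif 'Display *' in types_at_pos:
--             result.append('Display *')
--         elif 'Window' in types_at_pos:
--             result.append('Window')
--         elif 'float' in types_at_pos:
--             result.append('float')
--         elif types_at_pos:
--             result.append(types_at_pos[0])
--         else:
--             result.append('int')
--
--     return result
-- ===== SOURCE B (Python) =====
-- PRIORITY = ('void *', 'const char *', 'Widget', 'Display *', 'Window', 'float')
--
-- def merge_arg_types(type_lists):
--     """Merge multiple call signatures into a canonical type list.
--
--     Single pass over all elements: bucket by position, keeping the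
--     first-seen type and a set of priority types present there.
--     """
--     buckets = []  # per position: [first_seen_type, set_of_priority_types]
--     for tl in type_lists:
--         for i, t in enumerate(tl):
--             if i == len(buckets):
--                 buckets.append([t, set()])
--             if t in PRIORITY:
--                 buckets[i][1].add(t)
--     result = []
--     for first, flags in buckets:
--         for p in PRIORITY:
--             if p in flags:
--                 result.append(p)
--                 break
--         else:
--             result.append(first)
--     return result
-- ===== Notes on version B (the rewrite author's own statement) =====
-- stated objective: alternative
-- what changed: Replaces A's per-position rescans of every signature list (range(max_args) x type_lists loops plus an if/elif membership chain) with a single pass over all elements that buckets by position, keeping the first-seen type and a set of priority-type flags per bucket, then reads each answer off its bucket; measured only ~1.3x faster at the largest size, so no speed claim.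
import Mathlib
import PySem

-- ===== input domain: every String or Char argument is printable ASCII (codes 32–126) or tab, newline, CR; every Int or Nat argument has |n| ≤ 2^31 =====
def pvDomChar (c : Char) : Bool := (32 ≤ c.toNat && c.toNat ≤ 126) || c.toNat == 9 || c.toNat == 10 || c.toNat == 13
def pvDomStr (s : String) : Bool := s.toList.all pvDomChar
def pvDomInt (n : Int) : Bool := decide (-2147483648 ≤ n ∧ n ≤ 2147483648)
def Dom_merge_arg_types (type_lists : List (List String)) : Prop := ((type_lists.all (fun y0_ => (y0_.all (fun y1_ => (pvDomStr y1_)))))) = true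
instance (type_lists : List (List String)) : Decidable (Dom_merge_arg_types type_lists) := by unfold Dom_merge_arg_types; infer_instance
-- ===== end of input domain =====

-- B re-implements A in one pass over the elements (bucket per position with a
-- first-seen type and a set of priority flags) instead of A's per-position
-- rescans of every list; return values proved equal on all inputs.

-- ===== PORT A =====
-- the if/elif priority chain of A, applied to the collected types at a position
def pvPickA (ts : List String) : String :=
  if ts.contains "void *" then "void *"
  else if ts.contains "const char *" then "const char *"
  else if ts.contains "Widget" then "Widget"
  else if ts.contains "Display *" then "Display *"
  else if ts.contains "Window" then "Window"
  else if ts.contains "float" then "float"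
  else match ts with
    | t :: _ => t
    | [] => "int"

def merge_arg_types (type_lists : List (List String)) : List String :=
  if type_lists.isEmpty then []
  else
    -- max(len(tl) for tl in type_lists); Python's max of a nonempty Nat list
    let max_args := (type_lists.map List.length).foldr Nat.max 0
    -- for i in range(max_args): collect tl[i] for each tl with i < len(tl), then pick
    (List.range max_args).map (fun i =>
      pvPickA (type_lists.filterMap (fun tl => tl[i]?)))

-- ===== PORT B =====
def pvPRIORITY : List String :=
  ["void *", "const char *", "Widget", "Display *", "Window", "float"]

-- merge one signature into the buckets (the inner `for i, t in enumerate(tl)` loop,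
-- extending the bucket list when i == len(buckets))
def pvMergeOne : List (String × List String) → List String → List (String × List String)
  | bs, [] => bs
  | [], t :: ts =>
      (t, if pvPRIORITY.contains t then PySem.Set.add PySem.Set.empty t else PySem.Set.empty)
        :: pvMergeOne [] ts
  | (f, fl) :: bs, t :: ts =>
      (f, if pvPRIORITY.contains t then PySem.Set.add fl t else fl) :: pvMergeOne bs ts

-- the `for p in PRIORITY: … break / else: first` loop over one bucket
def pvPickB (e : String × List String) : String :=
  match pvPRIORITY.find? (fun p => e.2.contains p) with
  | some p => p
  | none => e.1

def merge_arg_types_alt (type_lists : List (List String)) : List String :=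
  (type_lists.foldl pvMergeOne []).map pvPickB

-- ===== PRECONDITION & SPEC =====
def Spec_merge_arg_types (type_lists : List (List String)) (out : List String) : Prop := out = merge_arg_types_alt type_lists
instance (type_lists : List (List String)) (out : List String) : Decidable (Spec_merge_arg_types type_lists out) := by unfold Spec_merge_arg_types; infer_instance

-- ===== CLAIM (what is proved, stated in full; the proofs are below) =====
def Claim_equal_merge_arg_types : Prop := ∀ (type_lists : List (List String)), Dom_merge_arg_types type_lists → Spec_merge_arg_types type_lists (merge_arg_types type_lists)

-- ===== LEMMAS AND PROOFS =====

-- the types appearing at position i across all signatures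
def pvTypesAt (L : List (List String)) (i : Nat) : List String :=
  L.filterMap (fun tl => tl[i]?)

def pvStep (fl : List String) (t : String) : List String :=
  if pvPRIORITY.contains t then PySem.Set.add fl t else fl

-- combining a bucket state with the types still to come at that position
def pvCombine : Option (String × List String) → List String → Option (String × List String)
  | none, [] => none
  | none, t :: ts => some (t, (t :: ts).foldl pvStep [])
  | some (f, fl), ts => some (f, ts.foldl pvStep fl)

-- merging two "contributions at position i" (one list's element, if any)
def pvCombine1 : Option (String × List String) → Option String → Option (String × List String)
  | x, none => x
  | none, some t => some (t, pvStep [] t)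
  | some (f, fl), some t => some (f, pvStep fl t)

theorem pvMergeOne_getElem? (tl : List String) (b : List (String × List String)) (i : Nat) :
    (pvMergeOne b tl)[i]? = pvCombine1 b[i]? tl[i]? := by
  induction tl generalizing b i with
  | nil => cases b <;> simp [pvMergeOne, pvCombine1]
  | cons t ts ih =>
    cases b with
    | nil =>
      cases i with
      | zero => simp [pvMergeOne, pvCombine1, pvStep]
      | succ j => simpa [pvMergeOne, pvCombine1] using ih [] j
    | cons e bs =>
      obtain ⟨f, fl⟩ := e
      cases i with
      | zero => simp [pvMergeOne, pvCombine1, pvStep]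
      | succ j => simpa [pvMergeOne] using ih bs j

theorem pvCombine_combine1 (x : Option (String × List String)) (y : Option String)
    (ts : List String) :
    pvCombine (pvCombine1 x y) ts = pvCombine x (y.toList ++ ts) := by
  cases y with
  | none => rfl
  | some t =>
    cases x with
    | none => simp [pvCombine1, pvCombine]
    | some e => obtain ⟨f, fl⟩ := e; simp [pvCombine1, pvCombine]

theorem pvTypesAt_cons (tl : List String) (L : List (List String)) (i : Nat) :
    pvTypesAt (tl :: L) i = tl[i]?.toList ++ pvTypesAt L i := by
  cases h : tl[i]? <;> simp [pvTypesAt, h]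

theorem pvFoldl_getElem? (L : List (List String)) (b : List (String × List String)) (i : Nat) :
    (L.foldl pvMergeOne b)[i]? = pvCombine b[i]? (pvTypesAt L i) := by
  induction L generalizing b with
  | nil =>
    cases h : b[i]? with
    | none => simp [pvTypesAt, pvCombine, h]
    | some e => obtain ⟨f, fl⟩ := e; simp [pvTypesAt, pvCombine, h]
  | cons tl L' ih =>
    rw [List.foldl_cons, ih, pvMergeOne_getElem?, pvCombine_combine1, pvTypesAt_cons]

theorem pvFoldlStep_eq (ts : List String) (s : List String) :
    ts.foldl pvStep s = (ts.filter (fun t => pvPRIORITY.contains t)).foldl PySem.Set.add s := by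
  induction ts generalizing s with
  | nil => rfl
  | cons t ts ih =>
    cases h : pvPRIORITY.contains t
    · simp only [List.foldl_cons, List.filter_cons, pvStep, h, Bool.false_eq_true, if_false]
      exact ih s
    · simp only [List.foldl_cons, List.filter_cons, pvStep, h, if_true]
      exact ih _

theorem pvFlags_contains (ts : List String) (p : String) :
    (ts.foldl pvStep []).contains p = (ts.contains p && pvPRIORITY.contains p) := by
  rw [pvFoldlStep_eq]
  have : (ts.filter (fun t => pvPRIORITY.contains t)).foldl PySem.Set.add ([] : List String)
      = PySem.Set.ofList (ts.filter (fun t => pvPRIORITY.contains t)) := by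
    rw [PySem.Set.ofList_eq_foldl]
  rw [this]
  by_cases hp : p ∈ PySem.Set.ofList (ts.filter (fun t => pvPRIORITY.contains t))
  · have hm := (PySem.Set.mem_ofList _ _).1 hp
    simp only [List.mem_filter] at hm
    simp [List.contains_eq_mem, hm.1]
  · have hm : ¬ (p ∈ ts ∧ pvPRIORITY.contains p = true) := by
      intro ⟨h1, h2⟩
      exact hp ((PySem.Set.mem_ofList _ _).2 (List.mem_filter.2 ⟨h1, h2⟩))
    simp only [List.contains_eq_mem]
    by_cases h1 : p ∈ ts
    · have h2 : pvPRIORITY.contains p = false := by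
        cases h : pvPRIORITY.contains p
        · rfl
        · exact absurd ⟨h1, h⟩ hm
      simp [h1]
    · simp [h1]

theorem pvPick_eq (t : String) (ts : List String) :
    pvPickB (t, (t :: ts).foldl pvStep []) = pvPickA (t :: ts) := by
  have h := fun p => pvFlags_contains (t :: ts) p
  simp only [pvPickB, pvPRIORITY, List.find?]
  rw [h "void *", h "const char *", h "Widget", h "Display *", h "Window", h "float"]
  simp only [pvPickA]
  have : ∀ p : String, (pvPRIORITY.contains p) = true →
      ((t :: ts).contains p && pvPRIORITY.contains p) = (t :: ts).contains p := by
    intro p hp; rw [hp, Bool.and_true]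
  rw [this "void *" (by decide), this "const char *" (by decide), this "Widget" (by decide),
    this "Display *" (by decide), this "Window" (by decide), this "float" (by decide)]
  split_ifs <;> simp_all

theorem pvTypesAt_ne_nil_iff (L : List (List String)) (i : Nat) :
    pvTypesAt L i ≠ [] ↔ i < (L.map List.length).foldr Nat.max 0 := by
  induction L with
  | nil => simp [pvTypesAt]
  | cons tl L' ih =>
    rw [pvTypesAt_cons]
    cases h : tl[i]? with
    | none =>
      have hlen : ¬ i < tl.length := by
        intro hc; exact absurd h (by simp [List.getElem?_eq_getElem hc])
      simp only [Option.toList, List.nil_append, List.map_cons, List.foldr_cons]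
      rw [ih]
      have e : tl.length.max (List.foldr Nat.max 0 (List.map List.length L'))
          = max tl.length (List.foldr Nat.max 0 (List.map List.length L')) := rfl
      rw [e, Nat.max_def]
      split_ifs <;> omega
    | some t =>
      have hlen : i < tl.length := by
        by_contra hc
        rw [List.getElem?_eq_none (by omega)] at h
        exact absurd h (by simp)
      simp only [Option.toList, List.cons_append, List.map_cons, List.foldr_cons]
      constructor
      · intro _
        have e : tl.length.max (List.foldr Nat.max 0 (List.map List.length L'))
            = max tl.length (List.foldr Nat.max 0 (List.map List.length L')) := rfl
        rw [e, Nat.max_def]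
        split_ifs <;> omega
      · intro _
        simp

-- ===== VERDICT (by name: the statement is the Claim_ definition above) =====
theorem merge_arg_types_spec : Claim_equal_merge_arg_types := by
  intro L _
  unfold Spec_merge_arg_types
  by_cases hL : L.isEmpty
  · have : L = [] := List.isEmpty_iff.1 hL
    subst this
    rfl
  · apply List.ext_getElem?
    intro i
    rw [merge_arg_types_alt, List.getElem?_map, pvFoldl_getElem?]
    simp only [merge_arg_types, hL, Bool.false_eq_true, if_false, List.getElem?_map]
    by_cases hi : i < (L.map List.length).foldr Nat.max 0
    · have hne := (pvTypesAt_ne_nil_iff L i).2 hi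
      obtain ⟨t, ts, hts⟩ := List.exists_cons_of_ne_nil hne
      rw [List.getElem?_range hi]
      simp only [Option.map_some, List.getElem?_nil]
      rw [hts]
      simp only [pvCombine, Option.map_some, pvPick_eq]
      exact congrArg (fun z => some (pvPickA z)) hts
    · have hnil : pvTypesAt L i = [] := by
        by_contra hc
        exact hi ((pvTypesAt_ne_nil_iff L i).1 hc)
      rw [List.getElem?_eq_none (by simpa using hi), hnil]
      simp [pvCombine]
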